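-- pv_equiv track=rewrite | github.com/BUNKAR615/portfolio-analyzer | app.py | find_default
-- ===== SOURCE A (Python) =====
-- def find_default(options, keywords):
--     """Intelligently finds the best default index for a selectbox."""
--     lower_options = [str(opt).lower() for opt in options]
--     for keyword in keywords:
--         # First, look for an exact match
--         if keyword in lower_options:
--             return lower_options.index(keyword)
--         # Then, look for a partial match
--         for i, option in enumerate(lower_options):
--             if keyword in option:
--                 return i
--     return 0 # Default to the first column if no match is found
-- ===== SOURCE B (Python) =====
-- def find_default(options, keywords):
--     """Intelligently finds the best default index for a selectbox."""
--     lows = [str(opt).lower() for opt in options]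
--     for kw in keywords:
--         best = min(((0 if opt == kw else 1, i)
--                     for i, opt in enumerate(lows) if kw in opt),
--                    default=None)
--         if best is not None:
--             return best[1]
--     return 0
-- ===== Notes on version B (the rewrite author's own statement) =====
-- stated objective: alternative
-- what changed: Replaces A's early-return scanning (membership test + .index, then a separate partial-match scan with early return) with a candidate-collection approach: per keyword it enumerates all matching options as (exact-flag, index) pairs and takes the lexicographic minimum, so exact-over-partial priority and first-index tie-breaking fall out of the min key instead of control flow.
import Mathlib
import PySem

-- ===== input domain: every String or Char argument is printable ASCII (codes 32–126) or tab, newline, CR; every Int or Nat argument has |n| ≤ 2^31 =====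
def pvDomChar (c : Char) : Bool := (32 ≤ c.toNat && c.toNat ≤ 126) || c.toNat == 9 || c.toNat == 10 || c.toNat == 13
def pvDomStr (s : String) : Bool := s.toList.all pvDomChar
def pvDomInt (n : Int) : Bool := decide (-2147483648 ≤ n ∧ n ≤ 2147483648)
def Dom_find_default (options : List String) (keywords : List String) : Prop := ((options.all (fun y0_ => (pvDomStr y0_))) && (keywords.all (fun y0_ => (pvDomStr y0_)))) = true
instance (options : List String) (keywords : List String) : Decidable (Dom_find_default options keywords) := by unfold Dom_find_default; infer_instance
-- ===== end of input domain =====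

-- B replaces A's early-return scans (membership + .index, then a separate partial scan) by
-- collecting all matching (exact-flag, index) candidates per keyword and taking their
-- lexicographic minimum (alternative decomposition, same cost).

-- ===== PORT A =====
-- inner 'for i, option in enumerate(lower_options): if keyword in option: return i'
def faPartial (kw : String) : List String → Nat → Option Nat
  | [], _ => none
  | o :: rest, i => if PySem.Str.isIn kw o then some i else faPartial kw rest (i + 1)

def faLoop (lows : List String) : List String → Int
  | [] => 0
  | kw :: rest =>
    if lows.contains kw then
      ((PySem.List.index? lows kw).getD 0 : Nat)
    else
      match faPartial kw lows 0 with
      | some i => (i : Int)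
      | none => faLoop lows rest

def find_default (options : List String) (keywords : List String) : Int :=
  faLoop (options.map PySem.Str.lower) keywords

-- ===== PORT B =====
-- Python tuple comparison (0|1 flag, index): strict lexicographic less-than
def fbLt (q b : Nat × Int) : Bool := q.1 < b.1 || (q.1 == b.1 && q.2 < b.2)

-- min(candidates, default=None): Python's min is a left fold keeping the first minimum
def fbMin? (l : List (Nat × Int)) : Option (Nat × Int) :=
  match l with
  | [] => none
  | p :: rest => some (rest.foldl (fun b q => if fbLt q b then q else b) p)

-- the generator '((0 if opt == kw else 1, i) for i, opt in enumerate(lows) if kw in opt)'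
def fbCands (kw : String) (lows : List String) : List (Nat × Int) :=
  (PySem.List.enumerate lows 0).filterMap fun p =>
    if PySem.Str.isIn kw p.2 then some ((if p.2 == kw then 0 else 1 : Nat), p.1) else none

def fbLoop (lows : List String) : List String → Int
  | [] => 0
  | kw :: rest =>
    match fbMin? (fbCands kw lows) with
    | some best => best.2
    | none => fbLoop lows rest

def find_default_alt (options : List String) (keywords : List String) : Int :=
  fbLoop (options.map PySem.Str.lower) keywords

-- ===== PRECONDITION & SPEC =====
def Spec_find_default (options : List String) (keywords : List String) (out : Int) : Prop := out = find_default_alt options keywords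
instance (options : List String) (keywords : List String) (out : Int) : Decidable (Spec_find_default options keywords out) := by unfold Spec_find_default; infer_instance

-- ===== CLAIM (what is proved, stated in full; the proofs are below) =====
def Claim_equal_find_default : Prop := ∀ (options : List String) (keywords : List String), Dom_find_default options keywords → Spec_find_default options keywords (find_default options keywords)

-- ===== LEMMAS AND PROOFS =====

-- right-recursive first-minimum, easier to induct on
def fbMinR : List (Nat × Int) → Option (Nat × Int)
  | [] => none
  | p :: rest =>
    match fbMinR rest with
    | none => some p
    | some q => some (if fbLt q p then q else p)

theorem fbLt_assoc (p c q : Nat × Int) :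
    (if fbLt q (if fbLt c p then c else p) then q else (if fbLt c p then c else p))
      = (if fbLt (if fbLt q c then q else c) p then (if fbLt q c then q else c) else p) := by
  simp only [fbLt, Bool.or_eq_true, Bool.and_eq_true, decide_eq_true_eq, beq_iff_eq]
  split_ifs <;> first | rfl | (exfalso; omega)

theorem fbMin?_eq_fbMinR (l : List (Nat × Int)) : fbMin? l = fbMinR l := by
  cases l with
  | nil => rfl
  | cons p rest =>
    simp only [fbMin?]
    induction rest generalizing p with
    | nil => rfl
    | cons c cs ih =>
      simp only [List.foldl_cons, ih, fbMinR]
      cases h : fbMinR cs with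
      | none => simp
      | some q => simp [fbLt_assoc]

theorem faPartial_shift (kw : String) (l : List String) (i : Nat) :
    faPartial kw l i = (faPartial kw l 0).map (· + i) := by
  induction l generalizing i with
  | nil => rfl
  | cons o rest ih =>
    simp only [faPartial]
    by_cases h : PySem.Str.isIn kw o
    · have h' : PySem.Chars.isIn kw.toList o.toList = true := by
        simpa [PySem.Str.isIn] using h
      simp [h']
    · have h' : PySem.Chars.isIn kw.toList o.toList = false := by
        simpa [PySem.Str.isIn] using h
      rw [if_neg h, if_neg h, ih (i + 1), ih 1]
      cases faPartial kw rest 0 with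
      | none => simp
      | some p => simp only [Option.map_some, Option.some.injEq]; omega

theorem self_isIn (s : String) : PySem.Str.isIn s s = true :=
  (PySem.Str.isIn_iff_infix _ _).mpr (List.infix_refl _)

theorem cands_min (kw : String) (l : List String) : ∀ (s : Int),
    fbMinR ((PySem.List.enumerate l s).filterMap fun p =>
        if PySem.Str.isIn kw p.2 then some ((if p.2 == kw then 0 else 1 : Nat), p.1) else none) =
      if kw ∈ l then some (0, s + (l.idxOf kw : Int))
      else match faPartial kw l 0 with
        | some p => some (1, s + (p : Int))
        | none => none := by
  induction l with
  | nil => intro s; simp [PySem.List.enumerate_nil, fbMinR, faPartial]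
  | cons o rest ih =>
    intro s
    rw [PySem.List.enumerate_cons]
    by_cases hin : PySem.Str.isIn kw o
    · -- head is a candidate
      have hin' : PySem.Chars.isIn kw.toList o.toList = true := by
        simpa [PySem.Str.isIn] using hin
      have hcons : ((s, o) :: PySem.List.enumerate rest (s + 1)).filterMap (fun p =>
          if PySem.Str.isIn kw p.2 then some ((if p.2 == kw then 0 else 1 : Nat), p.1) else none)
          = ((if o == kw then 0 else 1 : Nat), s) ::
            (PySem.List.enumerate rest (s + 1)).filterMap (fun p =>
              if PySem.Str.isIn kw p.2 then some ((if p.2 == kw then 0 else 1 : Nat), p.1) else none) := by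
        simp [hin']
      rw [hcons, fbMinR, ih (s + 1)]
      by_cases heq : o = kw
      · subst heq
        have hmem : o ∈ o :: rest := List.mem_cons_self
        rw [if_pos hmem, List.idxOf_cons_self]
        simp only [beq_self_eq_true, if_pos]
        by_cases hm : o ∈ rest
        · rw [if_pos hm]
          have : fbLt (0, s + 1 + (List.idxOf o rest : Int)) ((0 : Nat), s) = false := by
            simp only [fbLt]; simp; omega
          simp [this]
        · rw [if_neg hm]
          cases hfa : faPartial o rest 0 with
          | none => simp
          | some p =>
            have : fbLt (1, s + 1 + (p : Int)) ((0 : Nat), s) = false := by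
              simp only [fbLt]; simp
            simp [this]
      · have hbeq : (o == kw) = false := beq_eq_false_iff_ne.mpr heq
        simp only [hbeq, Bool.false_eq_true, if_false]
        have hmem : (kw ∈ o :: rest) ↔ (kw ∈ rest) := by
          simp only [List.mem_cons, or_iff_right_iff_imp]
          exact fun e => absurd e.symm heq
        by_cases hm : kw ∈ rest
        · rw [if_pos hm, if_pos (hmem.mpr hm), List.idxOf_cons_ne _ heq]
          have : fbLt (0, s + 1 + (List.idxOf kw rest : Int)) ((1 : Nat), s) = true := by
            simp [fbLt]
          simp only [this, if_pos]
          push_cast; ring_nf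
        · rw [if_neg hm, if_neg (hmem.not.mpr hm)]
          have hfa0 : faPartial kw (o :: rest) 0 = some 0 := by simp [faPartial, hin']
          rw [hfa0]
          cases hfa : faPartial kw rest 0 with
          | none => simp
          | some p =>
            have : fbLt (1, s + 1 + (p : Int)) ((1 : Nat), s) = false := by
              simp only [fbLt]; simp; omega
            simp [this]
    · -- head is filtered out; in particular o ≠ kw (kw is a substring of itself)
      have heq : o ≠ kw := fun e => hin (e ▸ self_isIn o)
      have hin' : PySem.Chars.isIn kw.toList o.toList = false := by
        simpa [PySem.Str.isIn] using hin
      have hcons : ((s, o) :: PySem.List.enumerate rest (s + 1)).filterMap (fun p =>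
          if PySem.Str.isIn kw p.2 then some ((if p.2 == kw then 0 else 1 : Nat), p.1) else none)
          = (PySem.List.enumerate rest (s + 1)).filterMap (fun p =>
              if PySem.Str.isIn kw p.2 then some ((if p.2 == kw then 0 else 1 : Nat), p.1) else none) := by
        simp [hin']
      rw [hcons, ih (s + 1)]
      have hmem : (kw ∈ o :: rest) ↔ (kw ∈ rest) := by
        simp only [List.mem_cons, or_iff_right_iff_imp]
        exact fun e => absurd e.symm heq
      by_cases hm : kw ∈ rest
      · rw [if_pos hm, if_pos (hmem.mpr hm), List.idxOf_cons_ne _ heq]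
        push_cast; ring_nf
      · rw [if_neg hm, if_neg (hmem.not.mpr hm)]
        have : faPartial kw (o :: rest) 0 = faPartial kw rest 1 := by
          simp [faPartial, hin']
        rw [this, faPartial_shift kw rest 1]
        cases faPartial kw rest 0 with
        | none => rfl
        | some p => simp only [Option.map_some]; congr 2; push_cast; ring

theorem idxOf?_of_mem (kw : String) (l : List String) (h : kw ∈ l) :
    List.idxOf? kw l = some (l.idxOf kw) := by
  induction l with
  | nil => simp at h
  | cons b r ihr =>
    by_cases hb : b = kw
    · subst hb; simp [List.idxOf?_cons, List.idxOf_cons_self]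
    · have hm : kw ∈ r := (List.mem_cons.mp h).resolve_left (fun e : kw = b => hb e.symm)
      simp [List.idxOf?_cons, hb, ihr hm, List.idxOf_cons_ne _ hb]

theorem indexGetD_eq_idxOf (l : List String) (kw : String) (h : kw ∈ l) :
    (PySem.List.index? l kw).getD 0 = l.idxOf kw := by
  rw [PySem.List.index?_eq_idxOf?, idxOf?_of_mem kw l h]; rfl

theorem loop_eq (lows : List String) (ks : List String) : faLoop lows ks = fbLoop lows ks := by
  induction ks with
  | nil => rfl
  | cons kw rest ih =>
    simp only [faLoop, fbLoop, fbCands, fbMin?_eq_fbMinR, cands_min]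
    by_cases hc : kw ∈ lows
    · rw [if_pos hc]
      have : lows.contains kw = true := by simpa using hc
      rw [if_pos this, indexGetD_eq_idxOf lows kw hc]
      simp
    · rw [if_neg hc, if_neg (by simpa using hc)]
      cases faPartial kw lows 0 <;> simp [ih]

-- ===== VERDICT (by name: the statement is the Claim_ definition above) =====
theorem find_default_spec : Claim_equal_find_default := by
  intro options keywords _
  unfold Spec_find_default find_default find_default_alt
  exact loop_eq _ _
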